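-- pv_equiv track=rewrite | github.com/birhanu-ma/A2SV-Solved-Questions | red-blue.py | RedBlue
-- ===== SOURCE A (Python) =====
-- def RedBlue(t,n,r,m,b):
--     r_prefix = []
--     r_sum = 0
--     for i in range(len(r)):
--         r_sum+=r[i]
--         r_prefix.append(r_sum)
--     b_prefix = []
--     b_sum = 0
--     for i in range(len(b)):
--         b_sum+=b[i]
--         b_prefix.append(b_sum)
--     r_maximum = max(r_prefix)
--     b_maximum = max(b_prefix)
--     r_max = max(r_prefix) if r_maximum>=1 else 0
--     b_max = max(b_prefix) if b_maximum>=1 else 0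
--     return r_max+b_max
-- ===== SOURCE B (Python) =====
-- def _best(xs):
--     s = best = 0
--     for x in xs:
--         s += x
--         if s > best:
--             best = s
--     return best
--
-- def RedBlue(t, n, r, m, b):
--     return _best(r) + _best(b)
-- ===== Notes on version B (the rewrite author's own statement) =====
-- stated objective: simpler
-- what changed: Replaces the prefix-list building plus separate max scans and the >=1 clamp by one running-max single pass per array (best starts at 0, so the clamp is implicit), with no prefix lists materialised.
-- crash fix: A raises ValueError (max of an empty sequence) when r or b is empty; B returns the natural value 0 for an empty array. — e.g. on RedBlue(1, 0, [], 0, []): A raises ValueError, B returns 0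
import Mathlib
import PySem

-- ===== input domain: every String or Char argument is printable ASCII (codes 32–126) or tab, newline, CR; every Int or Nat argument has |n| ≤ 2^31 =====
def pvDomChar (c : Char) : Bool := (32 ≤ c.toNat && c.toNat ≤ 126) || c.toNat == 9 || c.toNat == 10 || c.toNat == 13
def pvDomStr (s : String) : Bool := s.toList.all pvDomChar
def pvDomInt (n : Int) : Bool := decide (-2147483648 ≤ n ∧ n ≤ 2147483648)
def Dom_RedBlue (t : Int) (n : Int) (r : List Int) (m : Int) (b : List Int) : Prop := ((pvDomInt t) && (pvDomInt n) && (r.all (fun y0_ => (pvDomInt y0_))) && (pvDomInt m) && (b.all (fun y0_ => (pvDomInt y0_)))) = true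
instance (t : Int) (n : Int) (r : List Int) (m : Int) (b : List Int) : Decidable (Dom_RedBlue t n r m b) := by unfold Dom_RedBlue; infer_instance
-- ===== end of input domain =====

-- B replaces the prefix-list building plus separate max scans by one running-max pass
-- per array (objective: simpler); equivalence is about the return value only.

-- ===== PORT A =====
-- the for-loop over range(len(xs)) building the prefix list and the running sum
def pvPrefixLoop (xs : List Int) : List Int × Int :=
  (PySem.List.pyRange 0 xs.length 1).foldl
    (fun (st : List Int × Int) i =>
      let s := st.2 + PySem.List.pyGetD xs i 0
      (st.1 ++ [s], s))
    ([], 0)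

def RedBlue (t : Int) (n : Int) (r : List Int) (m : Int) (b : List Int) : Int :=
  let r_prefix := (pvPrefixLoop r).1
  let b_prefix := (pvPrefixLoop b).1
  -- max([]) raises ValueError in Python; Pre_RedBlue excludes empty r/b, .getD 0 is never taken there
  let r_maximum := (PySem.List.max? r_prefix (fun y => y)).getD 0
  let b_maximum := (PySem.List.max? b_prefix (fun y => y)).getD 0
  let r_max := if r_maximum ≥ 1 then (PySem.List.max? r_prefix (fun y => y)).getD 0 else 0
  let b_max := if b_maximum ≥ 1 then (PySem.List.max? b_prefix (fun y => y)).getD 0 else 0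
  r_max + b_max

-- ===== PORT B =====
-- single pass: running sum and running best-so-far (best starts at 0)
def pvBest (xs : List Int) : Int :=
  (xs.foldl (fun (st : Int × Int) x =>
      let s := st.1 + x
      (s, if s > st.2 then s else st.2))
    (0, 0)).2

def RedBlue_alt (t : Int) (n : Int) (r : List Int) (m : Int) (b : List Int) : Int :=
  pvBest r + pvBest b

-- ===== PRECONDITION & SPEC =====
-- A calls max() on both prefix lists, which raises ValueError when r or b is empty.
def Pre_RedBlue (t : Int) (n : Int) (r : List Int) (m : Int) (b : List Int) : Prop :=
  r ≠ [] ∧ b ≠ []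
instance (t : Int) (n : Int) (r : List Int) (m : Int) (b : List Int) : Decidable (Pre_RedBlue t n r m b) := by unfold Pre_RedBlue; infer_instance
def pvWitness_RedBlue : Int × Int × List Int × Int × List Int := (1, 2, [3, -1], 1, [-2])

-- A raises ValueError (max of an empty sequence) when r or b is empty; B returns the natural value 0 for an empty array.
def Raises_RedBlue (t : Int) (n : Int) (r : List Int) (m : Int) (b : List Int) : Prop :=
  r = [] ∨ b = []
instance (t : Int) (n : Int) (r : List Int) (m : Int) (b : List Int) : Decidable (Raises_RedBlue t n r m b) := by unfold Raises_RedBlue; infer_instance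
def pvRaiseWitness_RedBlue : Int × Int × List Int × Int × List Int := (1, 0, [], 0, [])
def pvRaiseWitnessOut_RedBlue : Int := 0

def Spec_RedBlue (t : Int) (n : Int) (r : List Int) (m : Int) (b : List Int) (out : Int) : Prop := out = RedBlue_alt t n r m b
instance (t : Int) (n : Int) (r : List Int) (m : Int) (b : List Int) (out : Int) : Decidable (Spec_RedBlue t n r m b out) := by unfold Spec_RedBlue; infer_instance

-- ===== CLAIM (what is proved, stated in full; the proofs are below) =====
def Claim_equal_RedBlue : Prop := ∀ (t : Int) (n : Int) (r : List Int) (m : Int) (b : List Int), Dom_RedBlue t n r m b → Pre_RedBlue t n r m b → Spec_RedBlue t n r m b (RedBlue t n r m b)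
def Claim_raises_RedBlue : Prop := (∀ (t : Int) (n : Int) (r : List Int) (m : Int) (b : List Int), Dom_RedBlue t n r m b → Raises_RedBlue t n r m b → ¬ Pre_RedBlue t n r m b) ∧ (Dom_RedBlue (pvRaiseWitness_RedBlue.1) (pvRaiseWitness_RedBlue.2.1) (pvRaiseWitness_RedBlue.2.2.1) (pvRaiseWitness_RedBlue.2.2.2.1) (pvRaiseWitness_RedBlue.2.2.2.2) ∧ Raises_RedBlue (pvRaiseWitness_RedBlue.1) (pvRaiseWitness_RedBlue.2.1) (pvRaiseWitness_RedBlue.2.2.1) (pvRaiseWitness_RedBlue.2.2.2.1) (pvRaiseWitness_RedBlue.2.2.2.2) ∧ RedBlue_alt (pvRaiseWitness_RedBlue.1) (pvRaiseWitness_RedBlue.2.1) (pvRaiseWitness_RedBlue.2.2.1) (pvRaiseWitness_RedBlue.2.2.2.1) (pvRaiseWitness_RedBlue.2.2.2.2) = pvRaiseWitnessOut_RedBlue)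

-- ===== LEMMAS AND PROOFS =====

-- structural list of prefix sums starting from running sum s
def pvPref (s : Int) : List Int → List Int
  | [] => []
  | x :: xs => (s + x) :: pvPref (s + x) xs

theorem pvPrefixLoop_foldl (xs : List Int) :
    pvPrefixLoop xs = xs.foldl
      (fun (st : List Int × Int) x => (st.1 ++ [st.2 + x], st.2 + x)) ([], 0) := by
  unfold pvPrefixLoop
  exact PySem.List.foldl_pyRange_zero_pyGetD xs 0
    (fun (st : List Int × Int) x => (st.1 ++ [st.2 + x], st.2 + x)) ([], 0)

theorem pvFoldl_pref (xs : List Int) : ∀ (acc : List Int) (s : Int),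
    xs.foldl (fun (st : List Int × Int) x => (st.1 ++ [st.2 + x], st.2 + x)) (acc, s)
      = (acc ++ pvPref s xs, s + xs.sum) := by
  induction xs with
  | nil => intro acc s; simp [pvPref]
  | cons x t ih =>
      intro acc s
      simp only [List.foldl_cons, ih, pvPref, List.sum_cons, List.append_assoc,
        List.singleton_append]
      congr 1
      ring

theorem pvBest_foldl (xs : List Int) : ∀ (s best : Int),
    (xs.foldl (fun (st : Int × Int) x =>
        let v := st.1 + x
        (v, if v > st.2 then v else st.2)) (s, best)).2
      = (pvPref s xs).foldl max best := by
  induction xs with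
  | nil => intro s best; simp [pvPref]
  | cons x t ih =>
      intro s best
      simp only [List.foldl_cons, pvPref, ih]
      congr 1
      simp [max_def]
      omega

theorem pvFoldl_max_zero (t : List Int) : ∀ (a b : Int),
    t.foldl max (max a b) = max a (t.foldl max b) := by
  induction t with
  | nil => intro a b; rfl
  | cons x t ih =>
      intro a b
      simp only [List.foldl_cons, max_assoc, ih]

-- one array: A's clamped max of prefix sums = B's running best
theorem pvSide (xs : List Int) (h : xs ≠ []) :
    (let mx := (PySem.List.max? (pvPrefixLoop xs).1 (fun y => y)).getD 0
     if mx ≥ 1 then mx else 0) = pvBest xs := by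
  obtain ⟨x, t, rfl⟩ := List.exists_cons_of_ne_nil h
  have hp : (pvPrefixLoop (x :: t)).1 = pvPref 0 (x :: t) := by
    rw [pvPrefixLoop_foldl, pvFoldl_pref]
    simp
  have hb : pvBest (x :: t) = (pvPref 0 (x :: t)).foldl max 0 := by
    unfold pvBest; rw [pvBest_foldl]
  rw [hp, hb]
  simp only [pvPref, PySem.List.max?_id_cons, Option.getD_some, List.foldl_cons]
  rw [show ((0 : Int) ⊔ (0 + x)) = max 0 (0 + x) from rfl, pvFoldl_max_zero]
  set M := (pvPref (0 + x) t).foldl max (0 + x)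
  rcases le_or_gt 1 M with hM1 | hM1
  · rw [if_pos hM1, max_eq_right (by omega)]
  · rw [if_neg (by omega), max_eq_left (by omega)]

-- ===== VERDICT (by name: the statement is the Claim_ definition above) =====
theorem RedBlue_spec : Claim_equal_RedBlue := by
  intro t n r m b _ hpre
  have hr := pvSide r hpre.1
  have hb := pvSide b hpre.2
  unfold Spec_RedBlue RedBlue RedBlue_alt
  simp only [] at hr hb ⊢
  omega

@[simp] theorem RedBlue_raises : Claim_raises_RedBlue := by
  unfold Claim_raises_RedBlue
  constructor
  · intro t n r m b _ hra hpre
    rcases hra with h | h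
    · exact hpre.1 h
    · exact hpre.2 h
  · decide
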